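-- pv_equiv track=rewrite | github.com/AndrewAnnex/asap_stereo | asap_stereo/asap.py | kwargs_to_args
-- ===== SOURCE A (Python) =====
-- import itertools
-- from typing import Optional, Dict, List, Tuple, Union, Callable
--
-- def kwargs_to_args(kwargs: Dict)-> List:
--     keys = []
--     # ensure keys start with '--' for asp scripts
--     for key in kwargs.keys():
--         key = str(key)
--         if key not in ('--t_srs', '--t_projwin'):
--             key = key.replace('_', '-')
--         if not key.startswith('--') and len(key) > 1:
--             keys.append(f'--{key}')
--         elif not key.startswith('-'):
--             keys.append(f'-{key}')
--         else:
--             keys.append(key)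
--     return [x for x in itertools.chain.from_iterable(itertools.zip_longest(keys, kwargs.values())) if x is not None]
-- ===== SOURCE B (Python) =====
-- def kwargs_to_args(kwargs):
--     args = []
--     for key, value in kwargs.items():
--         key = str(key)
--         if key not in ('--t_srs', '--t_projwin'):
--             key = key.replace('_', '-')
--         if not key.startswith('--') and len(key) > 1:
--             key = f'--{key}'
--         elif not key.startswith('-'):
--             key = f'-{key}'
--         args.append(key)
--         if value is not None:
--             args.append(value)
--     return args
-- ===== Notes on version B (the rewrite author's own statement) =====
-- stated objective: simpler
-- what changed: B replaces A's two-phase pipeline (build a keys list, then interleave it with the values via itertools.zip_longest/chain and filter out None) with a single pass over kwargs.items() that appends the normalized key and, when not None, the value.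
import Mathlib
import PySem

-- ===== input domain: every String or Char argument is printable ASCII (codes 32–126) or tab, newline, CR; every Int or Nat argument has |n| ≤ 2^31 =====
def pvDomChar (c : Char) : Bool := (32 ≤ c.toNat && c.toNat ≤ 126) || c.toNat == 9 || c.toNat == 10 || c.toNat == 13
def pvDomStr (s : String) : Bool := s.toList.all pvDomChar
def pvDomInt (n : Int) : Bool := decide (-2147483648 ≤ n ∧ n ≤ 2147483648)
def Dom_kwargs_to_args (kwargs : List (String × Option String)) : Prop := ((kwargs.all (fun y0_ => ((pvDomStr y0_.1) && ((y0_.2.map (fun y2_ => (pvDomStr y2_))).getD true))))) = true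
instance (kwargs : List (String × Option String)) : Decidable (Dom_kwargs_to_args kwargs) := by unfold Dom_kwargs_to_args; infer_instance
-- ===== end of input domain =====

-- B replaces A's two-phase keys-list + zip_longest/chain/None-filter pipeline with one pass
-- over the items appending the formatted key and the non-None value (objective: simpler).

-- shared key normalization (identical branch structure in both Pythons)
def pvFmtKey (key : String) : String :=
  let key := if key ≠ "--t_srs" ∧ key ≠ "--t_projwin" then PySem.Str.replace key "_" "-" else key
  if ¬ PySem.Str.startswith key "--" ∧ PySem.Str.len key > 1 then "--" ++ key
  else if ¬ PySem.Str.startswith key "-" then "-" ++ key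
  else key

-- ===== PORT A =====
-- itertools.chain.from_iterable(itertools.zip_longest(keys, values)) as a joint recursion
def pvChainZip : List String → List (Option String) → List (Option String)
  | [], [] => []
  | [], v :: vs => v :: pvChainZip [] vs
  | k :: ks, [] => some k :: pvChainZip ks []
  | k :: ks, v :: vs => some k :: v :: pvChainZip ks vs

def kwargs_to_args (kwargs : List (String × Option String)) : List String :=
  let keys := kwargs.foldl (fun acc kv => acc ++ [pvFmtKey kv.1]) []
  ((pvChainZip keys (kwargs.map Prod.snd)).filter (· ≠ none)).filterMap id

-- ===== PORT B =====
def kwargs_to_args_alt (kwargs : List (String × Option String)) : List String :=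
  kwargs.foldl (fun args kv =>
    let args := args ++ [pvFmtKey kv.1]
    match kv.2 with
    | some v => args ++ [v]
    | none => args) []

-- ===== PRECONDITION & SPEC =====
def Spec_kwargs_to_args (kwargs : List (String × Option String)) (out : List String) : Prop := out = kwargs_to_args_alt kwargs
instance (kwargs : List (String × Option String)) (out : List String) : Decidable (Spec_kwargs_to_args kwargs out) := by unfold Spec_kwargs_to_args; infer_instance

-- ===== CLAIM (what is proved, stated in full; the proofs are below) =====
def Claim_equal_kwargs_to_args : Prop := ∀ (kwargs : List (String × Option String)), Dom_kwargs_to_args kwargs → Spec_kwargs_to_args kwargs (kwargs_to_args kwargs)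

-- ===== LEMMAS AND PROOFS =====

theorem pv_keys_foldl (kwargs : List (String × Option String)) (acc : List String) :
    kwargs.foldl (fun acc kv => acc ++ [pvFmtKey kv.1]) acc = acc ++ kwargs.map (fun kv => pvFmtKey kv.1) := by
  induction kwargs generalizing acc with
  | nil => simp
  | cons kv t ih => simp [List.foldl, ih]

theorem pv_alt_foldl (kwargs : List (String × Option String)) (acc : List String) :
    kwargs.foldl (fun args kv =>
      let args := args ++ [pvFmtKey kv.1]
      match kv.2 with
      | some v => args ++ [v]
      | none => args) acc
    = acc ++ kwargs.flatMap (fun kv => pvFmtKey kv.1 :: kv.2.toList) := by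
  induction kwargs generalizing acc with
  | nil => simp
  | cons kv t ih =>
    rw [List.foldl_cons, ih]
    cases h : kv.2 <;> simp [h]

theorem pv_a_eq_flatMap (kwargs : List (String × Option String)) :
    ((pvChainZip (kwargs.map (fun kv => pvFmtKey kv.1)) (kwargs.map Prod.snd)).filter (· ≠ none)).filterMap id
    = kwargs.flatMap (fun kv => pvFmtKey kv.1 :: kv.2.toList) := by
  induction kwargs with
  | nil => simp [pvChainZip]
  | cons kv t ih =>
    cases h : kv.2 <;> simp [pvChainZip, List.filter, List.filterMap, h] <;> simpa using ih

-- ===== VERDICT (by name: the statement is the Claim_ definition above) =====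
theorem kwargs_to_args_spec : Claim_equal_kwargs_to_args := by
  intro kwargs _
  show kwargs_to_args kwargs = kwargs_to_args_alt kwargs
  unfold kwargs_to_args kwargs_to_args_alt
  rw [pv_keys_foldl, pv_alt_foldl]
  simpa using pv_a_eq_flatMap kwargs
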